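-- pv_equiv track=rewrite | github.com/oornnery/pjx | src/pjx/parser.py | _has_unquoted_jinja_block
-- ===== SOURCE A (Python) =====
-- def _has_unquoted_jinja_block(tag_text: str) -> bool:
--     """Check if an HTML opening tag contains ``{% %}`` outside of attribute quotes."""
--     in_single = False
--     in_double = False
--     i = 0
--     while i < len(tag_text):
--         c = tag_text[i]
--         if in_single:
--             if c == "'":
--                 in_single = False
--         elif in_double:
--             if c == '"':
--                 in_double = False
--         elif c == "'":
--             in_single = True
--         elif c == '"':
--             in_double = True
--         elif tag_text[i : i + 2] == "{%":
--             return True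
--         i += 1
--     return False
-- ===== SOURCE B (Python) =====
-- def _has_unquoted_jinja_block(tag_text: str) -> bool:
--     """Jump between quote spans with str.find instead of a per-char state machine:
--     search each unquoted stretch for "{%" and skip quoted spans wholesale."""
--     s = tag_text
--     while True:
--         sq = s.find("'")
--         dq = s.find('"')
--         if sq == -1 and dq == -1:
--             return "{%" in s
--         q = sq if dq == -1 or (sq != -1 and sq < dq) else dq
--         if "{%" in s[:q]:
--             return True
--         close = s.find(s[q], q + 1)
--         if close == -1:
--             return False
--         s = s[close + 1:]
-- ===== Notes on version B (the rewrite author's own statement) =====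
-- stated objective: faster
-- what changed: Replaced the per-character in_single/in_double state machine by find-based jumping: locate the earliest quote with str.find, search the unquoted stretch before it for the Jinja block opener with the `in` operator, skip the whole quoted span to its closing quote, and repeat; quote-free tails are a single substring search.
import Mathlib
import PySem

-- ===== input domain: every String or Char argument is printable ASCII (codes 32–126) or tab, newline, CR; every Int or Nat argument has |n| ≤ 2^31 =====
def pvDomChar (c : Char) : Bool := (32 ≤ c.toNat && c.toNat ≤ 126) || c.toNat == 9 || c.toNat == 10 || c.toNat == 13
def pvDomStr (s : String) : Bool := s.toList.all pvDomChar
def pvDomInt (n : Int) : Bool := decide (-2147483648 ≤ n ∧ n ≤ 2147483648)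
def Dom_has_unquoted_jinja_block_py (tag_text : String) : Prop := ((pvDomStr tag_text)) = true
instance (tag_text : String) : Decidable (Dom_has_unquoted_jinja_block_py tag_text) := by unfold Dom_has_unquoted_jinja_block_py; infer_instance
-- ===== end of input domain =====

-- B replaces A's per-character in_single/in_double state machine by find-based jumps from
-- quote to quote, searching each unquoted stretch with `in` (same O(n), measurably faster
-- in Python: the scanning moves into C-level str.find / `in`).

-- ===== PORT A =====
-- A's while-loop over index i with in_single/in_double flags; the slice test
-- tag_text[i:i+2] == "{%" is exactly (c = '{' ∧ rest.head? = some '%').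
def pvALoop : List Char → Bool → Bool → Bool
  | [], _, _ => false
  | c :: rest, in_single, in_double =>
    if in_single then
      pvALoop rest (if c = '\'' then false else in_single) in_double
    else if in_double then
      pvALoop rest in_single (if c = '"' then false else in_double)
    else if c = '\'' then
      pvALoop rest true in_double
    else if c = '"' then
      pvALoop rest in_single true
    else if c = '{' ∧ rest.head? = some '%' then
      true
    else
      pvALoop rest in_single in_double

def has_unquoted_jinja_block_py (tag_text : String) : Bool :=
  pvALoop tag_text.toList false false

-- ===== PORT B =====
-- Source B's `while True` loop; the fuel (= length + 1, each pass consumes past a closing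
-- quote) only makes the same computation total, it never runs out (proved below).
def pvBLoop : Nat → List Char → Bool
  | 0, _ => false
  | fuel + 1, s =>
    let sq := PySem.Chars.find s ['\'']
    let dq := PySem.Chars.find s ['"']
    if sq = -1 ∧ dq = -1 then
      PySem.Chars.isIn ['{', '%'] s
    else
      let q : Int := if dq = -1 ∨ (¬sq = -1 ∧ sq < dq) then sq else dq
      -- s[:q]: q ≥ 0 here (q is a successful find), so the slice is List.take
      if PySem.Chars.isIn ['{', '%'] (s.take q.toNat) then
        true
      else
        let close := PySem.Chars.findFrom s [PySem.List.pyGetD s q ' '] (q + 1)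
        if close = -1 then
          false
        else
          -- s[close+1:]: close ≥ 0 here, so the slice is List.drop
          pvBLoop fuel (s.drop (close + 1).toNat)

def has_unquoted_jinja_block_py_alt (tag_text : String) : Bool :=
  pvBLoop (tag_text.toList.length + 1) tag_text.toList

-- ===== PRECONDITION & SPEC =====
def Spec_has_unquoted_jinja_block_py (tag_text : String) (out : Bool) : Prop := out = has_unquoted_jinja_block_py_alt tag_text
instance (tag_text : String) (out : Bool) : Decidable (Spec_has_unquoted_jinja_block_py tag_text out) := by unfold Spec_has_unquoted_jinja_block_py; infer_instance

-- ===== CLAIM (what is proved, stated in full; the proofs are below) =====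
def Claim_equal_has_unquoted_jinja_block_py : Prop := ∀ (tag_text : String), Dom_has_unquoted_jinja_block_py tag_text → Spec_has_unquoted_jinja_block_py tag_text (has_unquoted_jinja_block_py tag_text)

-- ===== LEMMAS AND PROOFS =====

lemma isIn2_nil (x y : Char) : PySem.Chars.isIn [x, y] ([] : List Char) = false := by
  simp [PySem.Chars.isIn_eq_false_iff]

lemma head_prefix (y : Char) (l : List Char) : [y] <+: l ↔ l.head? = some y := by
  cases l <;> simp [List.cons_prefix_cons, eq_comm]

-- "xy" occurs in c :: l iff it occurs at the front or occurs in l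
lemma isIn2_cons (x y c : Char) (l : List Char) :
    PySem.Chars.isIn [x, y] (c :: l) =
      ((decide (c = x) && decide (l.head? = some y)) || PySem.Chars.isIn [x, y] l) := by
  rw [Bool.eq_iff_iff]
  simp only [Bool.or_eq_true, Bool.and_eq_true, decide_eq_true_eq,
    PySem.Chars.isIn_iff_infix, List.infix_cons_iff, List.cons_prefix_cons]
  rw [head_prefix]; tauto

-- unterminated quote: A ignores everything after it
lemma aLoop_single_unterminated (t : List Char) (h : '\'' ∉ t) :
    pvALoop t true false = false := by
  induction t with
  | nil => rfl
  | cons c rest ih =>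
    simp only [List.mem_cons, not_or] at h
    simp [pvALoop, Ne.symm h.1, ih h.2]

lemma aLoop_double_unterminated (t : List Char) (h : '"' ∉ t) :
    pvALoop t false true = false := by
  induction t with
  | nil => rfl
  | cons c rest ih =>
    simp only [List.mem_cons, not_or] at h
    simp [pvALoop, Ne.symm h.1, ih h.2]

-- in-quote state: A skips to the closing quote
lemma aLoop_single_close (w r : List Char) (h : '\'' ∉ w) :
    pvALoop (w ++ '\'' :: r) true false = pvALoop r false false := by
  induction w with
  | nil => simp [pvALoop]
  | cons c rest ih =>
    simp only [List.mem_cons, not_or] at h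
    simp [pvALoop, Ne.symm h.1, ih h.2]

lemma aLoop_double_close (w r : List Char) (h : '"' ∉ w) :
    pvALoop (w ++ '"' :: r) false true = pvALoop r false false := by
  induction w with
  | nil => simp [pvALoop]
  | cons c rest ih =>
    simp only [List.mem_cons, not_or] at h
    simp [pvALoop, Ne.symm h.1, ih h.2]

-- quote-free input: A's loop is exactly a substring search for "{%"
lemma aLoop_noquote (u : List Char) (h1 : '\'' ∉ u) (h2 : '"' ∉ u) :
    pvALoop u false false = PySem.Chars.isIn ['{', '%'] u := by
  induction u with
  | nil => simp [pvALoop, isIn2_nil]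
  | cons c rest ih =>
    simp only [List.mem_cons, not_or] at h1 h2
    by_cases hcl : c = '{'
    · by_cases hcr : rest.head? = some '%' <;>
        simp [pvALoop, hcl, hcr, isIn2_cons, ih h1.2 h2.2]
    · simp [pvALoop, Ne.symm h1.1, Ne.symm h2.1, hcl, isIn2_cons, ih h1.2 h2.2]

-- a quote-free prefix before a quote: A searches it, then continues at the quote
lemma aLoop_prefix (u v : List Char) (h1 : '\'' ∉ u) (h2 : '"' ∉ u)
    (hv : v.head? = some '\'' ∨ v.head? = some '"') :
    pvALoop (u ++ v) false false =
      (PySem.Chars.isIn ['{', '%'] u || pvALoop v false false) := by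
  induction u with
  | nil => simp [isIn2_nil]
  | cons c rest ih =>
    simp only [List.mem_cons, not_or] at h1 h2
    have hhead : (rest ++ v).head? = some '%' ↔ rest.head? = some '%' := by
      cases rest with
      | nil => rcases hv with hv | hv <;> simp [hv]
      | cons d tl => simp
    have hv' : ¬v.head? = some '%' := by rcases hv with h | h <;> simp [h]
    by_cases hcl : c = '{'
    · by_cases hcr : rest.head? = some '%' <;>
        simp [pvALoop, hcl, hcr, hv', isIn2_cons, ih h1.2 h2.2]
    · simp [pvALoop, Ne.symm h1.1, Ne.symm h2.1, hcl, isIn2_cons, ih h1.2 h2.2]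

-- a successful single-char find: position, decomposition, minimality
lemma find_char_spec (s : List Char) (c : Char) (h : PySem.Chars.find s [c] ≠ -1) :
    (PySem.Chars.find s [c]).toNat < s.length ∧
    s = s.take (PySem.Chars.find s [c]).toNat ++
        c :: s.drop ((PySem.Chars.find s [c]).toNat + 1) ∧
    (∀ i, i < (PySem.Chars.find s [c]).toNat → s[i]? ≠ some c) ∧
    s[(PySem.Chars.find s [c]).toNat]? = some c := by
  have hnn : 0 ≤ PySem.Chars.find s [c] :=
    (PySem.Chars.find_nonneg_iff s [c]).2 ((PySem.Chars.find_ne_neg_one_iff s [c]).1 h)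
  obtain ⟨hpre, hmin⟩ := PySem.Chars.find_spec hnn
  set n := (PySem.Chars.find s [c]).toNat with hn
  have hhead : (s.drop n).head? = some c := (head_prefix c _).1 hpre
  rw [List.head?_drop] at hhead
  have hlt : n < s.length := by
    by_contra hge
    rw [List.getElem?_eq_none (Nat.le_of_not_lt hge)] at hhead
    simp at hhead
  refine ⟨hlt, ?_, ?_, hhead⟩
  · conv_lhs => rw [← List.take_append_drop n s]
    congr 1
    rw [List.drop_eq_getElem_cons hlt]
    have : s[n] = c := by
      rw [List.getElem?_eq_getElem hlt] at hhead
      exact Option.some_injective _ hhead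
    rw [this]
  · intro i hi hci
    exact hmin i hi ((head_prefix c _).2 (by rw [List.head?_drop]; exact hci))

lemma char_not_in_take (s : List Char) (c : Char) (n : Nat)
    (h : ∀ i, i < n → s[i]? ≠ some c) : c ∉ s.take n := by
  intro hmem
  obtain ⟨i, hi, heq⟩ := List.getElem_of_mem hmem
  have hilen : i < s.length := lt_of_lt_of_le hi (by simp)
  have hin : i < n := lt_of_lt_of_le hi (by simp)
  apply h i hin
  rw [List.getElem_take] at heq
  rw [List.getElem?_eq_getElem hilen, heq]

-- one full pass of B's loop agrees with A, for the quote cq that opens first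
lemma bStep (fuel : Nat) (s : List Char) (cq oq : Char)
    (hpair : (cq = '\'' ∧ oq = '"') ∨ (cq = '"' ∧ oq = '\''))
    (hne : PySem.Chars.find s [cq] ≠ -1)
    (hoth : oq ∉ s.take (PySem.Chars.find s [cq]).toNat)
    (hfuel : s.length < fuel + 1)
    (ih : ∀ r : List Char, r.length < fuel → pvALoop r false false = pvBLoop fuel r) :
    pvALoop s false false =
      (if PySem.Chars.isIn ['{', '%'] (s.take (PySem.Chars.find s [cq]).toNat) then true
       else
         if PySem.Chars.findFrom s [PySem.List.pyGetD s (PySem.Chars.find s [cq]) ' ']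
              (PySem.Chars.find s [cq] + 1) = -1 then false
         else
           pvBLoop fuel
             (s.drop ((PySem.Chars.findFrom s
                 [PySem.List.pyGetD s (PySem.Chars.find s [cq]) ' ']
                 (PySem.Chars.find s [cq] + 1) + 1)).toNat)) := by
  obtain ⟨hlt, hdecomp, hmin, hget⟩ := find_char_spec s cq hne
  have hnn : 0 ≤ PySem.Chars.find s [cq] := by
    have := PySem.Chars.neg_one_le_find s [cq]; omega
  set n := (PySem.Chars.find s [cq]).toNat with hn
  have hcast : PySem.Chars.find s [cq] = (n : Int) := by omega
  have hcqu : cq ∉ s.take n := char_not_in_take s cq n hmin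
  have h1 : '\'' ∉ s.take n ∧ '"' ∉ s.take n := by
    rcases hpair with ⟨h, h'⟩ | ⟨h, h'⟩ <;> subst h <;> subst h'
    · exact ⟨hcqu, hoth⟩
    · exact ⟨hoth, hcqu⟩
  have hA : pvALoop s false false =
      (PySem.Chars.isIn ['{', '%'] (s.take n) || pvALoop (cq :: s.drop (n + 1)) false false) := by
    conv_lhs => rw [hdecomp]
    exact aLoop_prefix _ _ h1.1 h1.2 (by rcases hpair with ⟨h, _⟩ | ⟨h, _⟩ <;> simp [h])
  have hgetD : PySem.List.pyGetD s (PySem.Chars.find s [cq]) ' ' = cq := by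
    rw [PySem.List.pyGetD_of_nonneg s ' ' hnn, ← hn, List.getD_eq_getElem?_getD, hget]; rfl
  rw [hA, hgetD]
  by_cases hin : PySem.Chars.isIn ['{', '%'] (s.take n) = true
  · simp [hin]
  · rw [Bool.not_eq_true] at hin
    rw [hin, if_neg (by simp)]
    simp only [Bool.false_or]
    have hffrom : PySem.Chars.findFrom s [cq] (PySem.Chars.find s [cq] + 1) =
        if PySem.Chars.find (s.drop (n + 1)) [cq] = -1 then -1
        else ((n + 1 : Nat) : Int) + PySem.Chars.find (s.drop (n + 1)) [cq] := by
      rw [hcast]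
      have hnat := PySem.Chars.findFrom_natCast s [cq] (n + 1) hlt
      push_cast at hnat ⊢
      rw [← hnat]
    rw [hffrom]
    by_cases h2 : PySem.Chars.find (s.drop (n + 1)) [cq] = -1
    · rw [if_pos h2, if_pos rfl]
      have hcqt : cq ∉ s.drop (n + 1) := fun hm =>
        ((PySem.Chars.find_eq_neg_one_iff _ _).1 h2) ((List.singleton_infix_iff cq _).2 hm)
      rcases hpair with ⟨h, _⟩ | ⟨h, _⟩ <;> subst h
      · simp [pvALoop, aLoop_single_unterminated _ hcqt]
      · simp [pvALoop, aLoop_double_unterminated _ hcqt]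
    · rw [if_neg h2]
      have hj0 : 0 ≤ PySem.Chars.find (s.drop (n + 1)) [cq] := by
        have := PySem.Chars.neg_one_le_find (s.drop (n + 1)) [cq]; omega
      rw [if_neg (by omega)]
      obtain ⟨jlt, tdecomp, jmin, jget⟩ := find_char_spec (s.drop (n + 1)) cq h2
      set j := (PySem.Chars.find (s.drop (n + 1)) [cq]).toNat with hjn
      have hidx : ((n + 1 : Nat) : Int) + PySem.Chars.find (s.drop (n + 1)) [cq] + 1 =
          (((n + 1) + (j + 1) : Nat) : Int) := by omega
      rw [hidx, Int.toNat_natCast]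
      rw [show List.drop ((n + 1) + (j + 1)) s = List.drop (j + 1) (List.drop (n + 1) s) from
        (List.drop_drop).symm]
      have hlen : (List.drop (j + 1) (List.drop (n + 1) s)).length < fuel := by
        simp only [List.length_drop] at jlt ⊢
        omega
      rw [← ih _ hlen]
      have hw : cq ∉ (List.drop (n + 1) s).take j := char_not_in_take _ _ _ jmin
      rcases hpair with ⟨h, _⟩ | ⟨h, _⟩ <;> subst h
      · have e1 : pvALoop ('\'' :: s.drop (n + 1)) false false =
            pvALoop (s.drop (n + 1)) true false := by simp [pvALoop]
        rw [e1]
        conv_lhs => rw [tdecomp]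
        exact aLoop_single_close _ _ hw
      · have e1 : pvALoop ('"' :: s.drop (n + 1)) false false =
            pvALoop (s.drop (n + 1)) false true := by simp [pvALoop]
        rw [e1]
        conv_lhs => rw [tdecomp]
        exact aLoop_double_close _ _ hw

lemma main_loop (fuel : Nat) : ∀ s : List Char, s.length < fuel →
    pvALoop s false false = pvBLoop fuel s := by
  induction fuel with
  | zero => intro s h; omega
  | succ fuel ih =>
    intro s hfuel
    simp only [pvBLoop]
    by_cases hq : PySem.Chars.find s ['\''] = -1 ∧ PySem.Chars.find s ['"'] = -1
    · rw [if_pos hq]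
      have h1 : '\'' ∉ s := fun hm =>
        ((PySem.Chars.find_eq_neg_one_iff _ _).1 hq.1) ((List.singleton_infix_iff _ _).2 hm)
      have h2 : '"' ∉ s := fun hm =>
        ((PySem.Chars.find_eq_neg_one_iff _ _).1 hq.2) ((List.singleton_infix_iff _ _).2 hm)
      exact aLoop_noquote s h1 h2
    · rw [if_neg hq]
      by_cases hc : PySem.Chars.find s ['"'] = -1 ∨
          (¬PySem.Chars.find s ['\''] = -1 ∧ PySem.Chars.find s ['\''] < PySem.Chars.find s ['"'])
      · rw [if_pos hc]
        have hsq : PySem.Chars.find s ['\''] ≠ -1 := by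
          rcases hc with hdq | ⟨hsq, _⟩
          · exact fun h => hq ⟨h, hdq⟩
          · exact hsq
        have hoth : '"' ∉ s.take (PySem.Chars.find s ['\'']).toNat := by
          rcases hc with hdq | ⟨hsq', hlt⟩
          · have h2 : '"' ∉ s := fun hm =>
              ((PySem.Chars.find_eq_neg_one_iff _ _).1 hdq) ((List.singleton_infix_iff _ _).2 hm)
            exact fun hm => h2 (List.take_subset _ _ hm)
          · have hsq0 : 0 ≤ PySem.Chars.find s ['\''] := by
              have := PySem.Chars.neg_one_le_find s ['\'']; omega
            have hdq' : PySem.Chars.find s ['"'] ≠ -1 := by omega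
            obtain ⟨_, _, hmin, _⟩ := find_char_spec s '"' hdq'
            refine char_not_in_take s '"' _ fun i hi => hmin i ?_
            have := (Int.toNat_lt_toNat (by omega :
              (0 : Int) < PySem.Chars.find s ['"'])).2 hlt
            omega
        exact bStep fuel s '\'' '"' (Or.inl ⟨rfl, rfl⟩) hsq hoth hfuel ih
      · rw [if_neg hc]
        rw [not_or] at hc
        have hdq : PySem.Chars.find s ['"'] ≠ -1 := hc.1
        have hoth : '\'' ∉ s.take (PySem.Chars.find s ['"']).toNat := by
          by_cases hsq : PySem.Chars.find s ['\''] = -1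
          · have h1 : '\'' ∉ s := fun hm =>
              ((PySem.Chars.find_eq_neg_one_iff _ _).1 hsq) ((List.singleton_infix_iff _ _).2 hm)
            exact fun hm => h1 (List.take_subset _ _ hm)
          · have hle : PySem.Chars.find s ['"'] ≤ PySem.Chars.find s ['\''] := by
              have := not_and.1 hc.2 hsq; omega
            obtain ⟨_, _, hmin, _⟩ := find_char_spec s '\'' hsq
            refine char_not_in_take s '\'' _ fun i hi => hmin i ?_
            have hdq0 : 0 ≤ PySem.Chars.find s ['"'] := by
              have := PySem.Chars.neg_one_le_find s ['"']; omega
            omega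
        exact bStep fuel s '"' '\'' (Or.inr ⟨rfl, rfl⟩) hdq hoth hfuel ih

-- ===== VERDICT (by name: the statement is the Claim_ definition above) =====
theorem has_unquoted_jinja_block_py_spec : Claim_equal_has_unquoted_jinja_block_py := by
  intro t _
  unfold Spec_has_unquoted_jinja_block_py has_unquoted_jinja_block_py has_unquoted_jinja_block_py_alt
  exact main_loop _ _ (Nat.lt_succ_self _)
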